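-- pv_equiv track=rewrite | github.com/LiangClub/SpaMFC | src/unification/mapping.py | get_mapping_summary
-- ===== SOURCE A (Python) =====
-- from typing import Dict, List, Optional
--
-- def get_mapping_summary(
--
--     unified_names: Dict[str, str]
-- ) -> str:
--     """Get mapping summary string"""
--     unified_counts = {}
--
--     for original, unified in unified_names.items():
--         unified_counts[unified] = unified_counts.get(unified, 0) + 1
--
--     summary = "Subtype unification summary:\n"
--     for unified, count in sorted(unified_counts.items()):
--         summary += f"  {unified}: {count} original subtypes\n"
--
--     return summary
-- ===== SOURCE B (Python) =====
-- def get_mapping_summary(unified_names):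
--     """Get mapping summary string (sort values, then emit one line per run)."""
--     def lines(vals):
--         if not vals:
--             return ""
--         v = vals[0]
--         run = 1
--         while run < len(vals) and vals[run] == v:
--             run += 1
--         return f"  {v}: {run} original subtypes\n" + lines(vals[run:])
--     return "Subtype unification summary:\n" + lines(sorted(unified_names.values()))
-- ===== Notes on version B (the rewrite author's own statement) =====
-- stated objective: alternative
-- what changed: Replaces the count-dict-then-sort-items strategy with sorting the values once and emitting one summary line per consecutive run (recursive run-length scan over the sorted values), so no dictionary is built at all.
import Mathlib
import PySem

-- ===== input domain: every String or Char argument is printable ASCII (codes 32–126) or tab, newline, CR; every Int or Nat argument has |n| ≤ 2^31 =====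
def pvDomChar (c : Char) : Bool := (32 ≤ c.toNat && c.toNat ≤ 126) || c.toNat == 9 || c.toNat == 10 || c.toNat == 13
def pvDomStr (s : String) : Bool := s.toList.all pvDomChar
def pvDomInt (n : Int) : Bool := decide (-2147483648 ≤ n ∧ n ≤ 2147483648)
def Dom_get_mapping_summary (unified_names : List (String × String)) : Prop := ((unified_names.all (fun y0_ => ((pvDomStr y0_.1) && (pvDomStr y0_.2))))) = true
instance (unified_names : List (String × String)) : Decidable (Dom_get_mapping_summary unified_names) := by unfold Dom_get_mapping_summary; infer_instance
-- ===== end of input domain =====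

-- B sorts the values once and emits one line per consecutive run; A builds a count dict and sorts its items.

-- ===== PORT A =====
def get_mapping_summary (unified_names : List (String × String)) : String :=
  let unified_counts :=
    unified_names.foldl (fun d p => d.insert p.2 (d.getD p.2 0 + 1)) PySem.Dict.empty
  (PySem.List.sorted2 unified_counts.items Prod.fst Prod.snd).foldl
    (fun summary p =>
      summary ++ "  " ++ p.1 ++ ": " ++ PySem.Int.toStr p.2 ++ " original subtypes\n")
    "Subtype unification summary:\n"

-- ===== PORT B =====
-- the inner `while` of Source B counts the leading elements equal to v: run = 1 + |takeWhile (== v) rest|;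
-- vals[run:] (run ≥ 0, run ≤ len) is rest.drop (run - 1).
def pvLines : List String → String
  | [] => ""
  | v :: rest =>
    let t := rest.takeWhile (fun x => x == v)
    let run : Int := 1 + (t.length : Int)
    "  " ++ v ++ ": " ++ PySem.Int.toStr run ++ " original subtypes\n" ++ pvLines (rest.drop t.length)
termination_by vals => vals.length
decreasing_by simp [List.length_drop]

def get_mapping_summary_alt (unified_names : List (String × String)) : String :=
  "Subtype unification summary:\n" ++
    pvLines (PySem.List.sorted (unified_names.map Prod.snd) (fun x => x) false)

-- ===== PRECONDITION & SPEC =====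
def Spec_get_mapping_summary (unified_names : List (String × String)) (out : String) : Prop := out = get_mapping_summary_alt unified_names
instance (unified_names : List (String × String)) (out : String) : Decidable (Spec_get_mapping_summary unified_names out) := by unfold Spec_get_mapping_summary; infer_instance

-- ===== CLAIM (what is proved, stated in full; the proofs are below) =====
def Claim_equal_get_mapping_summary : Prop := ∀ (unified_names : List (String × String)), Dom_get_mapping_summary unified_names → Spec_get_mapping_summary unified_names (get_mapping_summary unified_names)

-- ===== LEMMAS AND PROOFS =====

-- one summary line
def pvLine (u : String) (c : Int) : String :=
  "  " ++ u ++ ": " ++ PySem.Int.toStr c ++ " original subtypes\n"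

def pvJoin : List String → String
  | [] => ""
  | x :: xs => x ++ pvJoin xs

theorem pvInsertBy_congr {α : Type} (lt lt' : α → α → Bool) (x : α) (ys : List α)
    (h : ∀ y ∈ ys, lt x y = lt' x y) :
    PySem.List.insertBy lt x ys = PySem.List.insertBy lt' x ys := by
  induction ys with
  | nil => rfl
  | cons y ys ih =>
    simp only [PySem.List.insertBy]
    rw [h y (by simp), ih (fun z hz => h z (by simp [hz]))]

theorem pvFoldl_insertBy_aux {α : Type} (lt lt' : α → α → Bool) (S : List α) :
    ∀ (xs acc : List α), (∀ a ∈ xs, a ∈ S) → (∀ a ∈ acc, a ∈ S) →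
    (∀ a ∈ S, ∀ b ∈ S, lt a b = lt' a b) →
    xs.foldl (fun acc x => PySem.List.insertBy lt x acc) acc =
      xs.foldl (fun acc x => PySem.List.insertBy lt' x acc) acc := by
  intro xs
  induction xs with
  | nil => intro acc _ _ _; rfl
  | cons x xs ih =>
    intro acc hxs hacc h
    simp only [List.foldl_cons]
    rw [pvInsertBy_congr lt lt' x acc
      (fun y hy => h x (hxs x (by simp)) y (hacc y hy))]
    exact ih _ (fun a ha => hxs a (by simp [ha]))
      (fun a ha => by
        rcases (PySem.List.mem_insertBy lt' x a acc).1 ha with rfl | ha'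
        · exact hxs a (by simp)
        · exact hacc a ha') h

theorem pvTakeWhile_none {α : Type} (p : α → Bool) (l : List α)
    (h : ∀ x ∈ l, p x = false) : l.takeWhile p = [] := by
  cases l with
  | nil => rfl
  | cons x xs => simp [h x (by simp)]

theorem pvCount_flatMap_replicate (cnt : String → Nat) (ds : List String) (hnd : ds.Nodup)
    (v : String) :
    (ds.flatMap fun k => List.replicate (cnt k) k).count v = if v ∈ ds then cnt v else 0 := by
  induction ds with
  | nil => simp
  | cons d ds ih =>
    rcases List.nodup_cons.1 hnd with ⟨hd, hnd'⟩
    simp only [List.flatMap_cons, List.count_append, List.count_replicate, ih hnd',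
      List.mem_cons]
    by_cases hvd : v = d
    · subst hvd; simp [hd]
    · simp [hvd, Ne.symm hvd]

theorem pvPairwise_le_flatMap (cnt : String → Nat) (ds : List String)
    (h : ds.Pairwise (· < ·)) :
    (ds.flatMap fun k => List.replicate (cnt k) k).Pairwise (· ≤ ·) := by
  induction ds with
  | nil => simp
  | cons d ds ih =>
    rcases List.pairwise_cons.1 h with ⟨hd, h'⟩
    simp only [List.flatMap_cons]
    refine List.pairwise_append.2 ⟨?_, ih h', ?_⟩
    · exact List.pairwise_replicate.2 (Or.inr le_rfl)
    · intro a ha b hb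
      rcases List.mem_flatMap.1 hb with ⟨k, hk, hbk⟩
      rw [List.eq_of_mem_replicate ha, List.eq_of_mem_replicate hbk]
      exact le_of_lt (hd k hk)

theorem pvFoldlA (l : List (String × Int)) (init : String) :
    l.foldl (fun s p => s ++ "  " ++ p.1 ++ ": " ++ PySem.Int.toStr p.2 ++ " original subtypes\n") init
      = init ++ pvJoin (l.map (fun p => pvLine p.1 p.2)) := by
  induction l generalizing init with
  | nil => simp [pvJoin]
  | cons p l ih =>
    simp only [List.foldl_cons, List.map_cons]
    rw [ih]
    simp [pvJoin, pvLine, String.append_assoc]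

theorem pvLines_flatMap (cnt : String → Nat) (ds : List String)
    (hpos : ∀ k ∈ ds, 1 ≤ cnt k) (hlt : ds.Pairwise (· < ·)) :
    pvLines (ds.flatMap (fun k => List.replicate (cnt k) k))
      = pvJoin (ds.map (fun k => pvLine k ((cnt k : Int)))) := by
  induction ds with
  | nil => simp [pvLines, pvJoin]
  | cons d ds ih =>
    rcases List.pairwise_cons.1 hlt with ⟨hd, hlt'⟩
    obtain ⟨n, hn⟩ : ∃ n, cnt d = n + 1 :=
      ⟨cnt d - 1, by have := hpos d (by simp); omega⟩
    have hrest : ∀ x ∈ ds.flatMap (fun k => List.replicate (cnt k) k), (x == d) = false := by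
      intro x hx
      rcases List.mem_flatMap.1 hx with ⟨k, hk, hxk⟩
      rw [List.eq_of_mem_replicate hxk]
      simpa [beq_eq_false_iff_ne] using (hd k hk).ne'
    rw [List.flatMap_cons, hn, List.replicate_succ, List.cons_append, pvLines]
    have htw : ((List.replicate n d ++ ds.flatMap fun k => List.replicate (cnt k) k).takeWhile
        (fun x => x == d)) = List.replicate n d := by
      rw [List.takeWhile_append]
      simp [pvTakeWhile_none _ _ hrest]
    rw [htw]
    simp only [List.length_replicate]
    rw [List.drop_left' (by simp)]
    rw [ih (fun k hk => hpos k (by simp [hk])) hlt']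
    simp only [List.map_cons, pvJoin, pvLine, hn]
    have h1 : (1 : Int) + (n : Int) = ((n + 1 : Nat) : Int) := by push_cast; ring
    rw [h1]

theorem get_mapping_summary_spec' (unified_names : List (String × String)) :
    get_mapping_summary unified_names = get_mapping_summary_alt unified_names := by
  classical
  set vals := unified_names.map Prod.snd with hvals
  set ds := PySem.List.sorted (PySem.Set.ofList vals) (fun x => x) false with hds
  have hdsnd : ds.Nodup := (PySem.List.sorted_perm _ _ _).nodup_iff.2 (PySem.Set.nodup_ofList vals)
  have hdslt : ds.Pairwise (· < ·) := PySem.List.sorted_ofList_pairwise_lt vals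
  -- A's count dict is Counter(vals)
  have hcnt : unified_names.foldl (fun d p => d.insert p.2 (d.getD p.2 0 + 1)) PySem.Dict.empty
      = PySem.Dict.counter vals := by
    have h := PySem.Dict.foldl_insert_getD_add_one_eq_counter (κ := String) vals
    rw [hvals, List.foldl_map] at h
    exact h
  -- A's sorted items list
  have hitems : PySem.List.sorted2 (PySem.Dict.counter vals).items Prod.fst Prod.snd
      = ds.map (fun k => (k, (vals.count k : Int))) := by
    have hcongr : PySem.List.sorted2 (PySem.Dict.counter vals).items Prod.fst Prod.snd
        = PySem.List.sorted (PySem.Dict.counter vals).items Prod.fst false := by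
      rw [PySem.List.sorted_eq_foldl_insertBy]
      show List.foldl _ [] _ = _
      apply pvFoldl_insertBy_aux _ _ ((PySem.Dict.counter vals).items) _ []
        (fun a ha => ha) (by simp)
      intro a ha b hb
      rw [PySem.Dict.items_counter] at ha hb
      rcases List.mem_map.1 ha with ⟨k1, hk1, rfl⟩
      rcases List.mem_map.1 hb with ⟨k2, hk2, rfl⟩
      rcases lt_trichotomy k1 k2 with h | h | h
      · simp [h, not_lt_of_gt h]
      · subst h; simp
      · simp [h, (not_lt_of_gt h : ¬ k1 < k2)]
    rw [hcongr]
    apply PySem.List.sorted_eq_of_perm_of_pairwise_lt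
    · rw [PySem.Dict.items_counter]
      exact (PySem.List.sorted_perm _ _ _).map _
    · exact List.Pairwise.map _ (fun a b hab => hab) hdslt
  -- B's sorted values list
  have hsortvals : PySem.List.sorted vals (fun x => x) false
      = ds.flatMap (fun k => List.replicate (vals.count k) k) := by
    apply PySem.List.sorted_id_eq_of_perm_of_pairwise
    · rw [List.perm_iff_count]
      intro v
      rw [pvCount_flatMap_replicate _ _ hdsnd]
      by_cases hv : v ∈ vals
      · simp [hds, PySem.List.mem_sorted, (PySem.Set.mem_ofList vals v).2 hv]
      · have : v ∉ ds := by
          rw [hds, PySem.List.mem_sorted, PySem.Set.mem_ofList]; exact hv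
        simp [this, List.count_eq_zero_of_not_mem hv]
    · exact pvPairwise_le_flatMap _ _ hdslt
  show (PySem.List.sorted2 _ Prod.fst Prod.snd).foldl _ _ = _
  rw [hcnt, hitems, pvFoldlA]
  unfold get_mapping_summary_alt
  rw [hsortvals, pvLines_flatMap (fun k => vals.count k) ds
    (fun k hk => List.count_pos_iff.2 (by
      rw [hds, PySem.List.mem_sorted, PySem.Set.mem_ofList] at hk; exact hk)) hdslt]
  simp [pvLine, Function.comp_def]

-- ===== VERDICT (by name: the statement is the Claim_ definition above) =====
theorem get_mapping_summary_spec : Claim_equal_get_mapping_summary := by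
  intro u _
  exact get_mapping_summary_spec' u
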